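-- pv_equiv track=rewrite | github.com/jxtse/auto-paper-harvester | auto_paper_download/downloader.py | classify_publisher
-- ===== SOURCE A (Python) =====
-- WILEY_PREFIXES = ("10.1002", "10.1111")
--
-- ELSEVIER_PREFIXES = ("10.1016", "10.1011")  # 10.1011 is rare but reserved by Elsevier
--
-- SPRINGER_PREFIXES = ("10.1007", "10.1038", "10.1186")
--
-- def classify_publisher(doi: str) -> str | None:
--     lowered = doi.lower()
--     if any(lowered.startswith(prefix) for prefix in WILEY_PREFIXES):
--         return "Wiley"
--     if any(lowered.startswith(prefix) for prefix in ELSEVIER_PREFIXES):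
--         return "Elsevier"
--     if any(lowered.startswith(prefix) for prefix in SPRINGER_PREFIXES):
--         return "Springer"
--     return "Crossref"
-- ===== SOURCE B (Python) =====
-- def classify_publisher(doi: str) -> str | None:
--     # Unrolled character trie: the seven reserved prefixes share the stem
--     # "10.1", so one check on the first four characters and a per-character
--     # decision tree on the remaining three classify the DOI with no
--     # prefix-list scanning at all.
--     head = doi.lower()[:7]
--     if len(head) != 7:
--         return "Crossref"
--     c0, c1, c2, c3, c4, c5, c6 = head
--     if c0 != '1' or c1 != '0' or c2 != '.' or c3 != '1':
--         return "Crossref"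
--     if c4 == '0':
--         if c5 == '0':
--             if c6 == '2':
--                 return "Wiley"
--             if c6 == '7':
--                 return "Springer"
--         elif c5 == '1':
--             if c6 == '6' or c6 == '1':
--                 return "Elsevier"
--         elif c5 == '3':
--             if c6 == '8':
--                 return "Springer"
--     elif c4 == '1':
--         if c5 == '1' and c6 == '1':
--             return "Wiley"
--         if c5 == '8' and c6 == '6':
--             return "Springer"
--     return "Crossref"
-- ===== Notes on version B (the rewrite author's own statement) =====
-- stated objective: alternative
-- what changed: Replaces the three any/startswith scans over prefix tuples with an unrolled character trie: one check of the shared stem '10.1' followed by a per-character decision tree on characters 4-6 of the lowercased DOI, so no prefix list is scanned.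
import Mathlib
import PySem

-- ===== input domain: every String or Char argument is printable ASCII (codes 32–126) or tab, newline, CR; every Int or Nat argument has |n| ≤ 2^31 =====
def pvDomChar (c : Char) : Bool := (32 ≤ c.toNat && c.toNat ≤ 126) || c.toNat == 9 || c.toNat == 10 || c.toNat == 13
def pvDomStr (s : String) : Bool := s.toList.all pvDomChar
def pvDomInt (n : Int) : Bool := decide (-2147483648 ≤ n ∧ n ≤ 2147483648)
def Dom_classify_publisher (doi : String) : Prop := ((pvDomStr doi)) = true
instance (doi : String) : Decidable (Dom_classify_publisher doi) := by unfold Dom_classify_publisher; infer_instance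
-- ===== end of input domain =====

-- B replaces the three any/startswith prefix scans with an unrolled character trie
-- (shared stem "10.1" then a per-character decision tree); alternative, not claimed faster.

-- ===== PORT A =====
def WILEY_PREFIXES : List String := ["10.1002", "10.1111"]
def ELSEVIER_PREFIXES : List String := ["10.1016", "10.1011"]
def SPRINGER_PREFIXES : List String := ["10.1007", "10.1038", "10.1186"]

def classify_publisher (doi : String) : String :=
  let lowered := PySem.Str.lower doi
  if WILEY_PREFIXES.any (fun prefix_ => PySem.Str.startswith lowered prefix_) then "Wiley"
  else if ELSEVIER_PREFIXES.any (fun prefix_ => PySem.Str.startswith lowered prefix_) then "Elsevier"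
  else if SPRINGER_PREFIXES.any (fun prefix_ => PySem.Str.startswith lowered prefix_) then "Springer"
  else "Crossref"

-- ===== PORT B =====
-- decision tree on the 7 characters of head (the match arm is Python's
-- `len(head) != 7` guard plus the tuple unpacking of head's characters)
def classify_publisher_alt (doi : String) : String :=
  let head := PySem.Str.slice (PySem.Str.lower doi) none (some 7)
  match head.toList with
  | [c0, c1, c2, c3, c4, c5, c6] =>
    if c0 ≠ '1' ∨ c1 ≠ '0' ∨ c2 ≠ '.' ∨ c3 ≠ '1' then "Crossref"
    else if c4 = '0' then
      if c5 = '0' then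
        if c6 = '2' then "Wiley"
        else if c6 = '7' then "Springer"
        else "Crossref"
      else if c5 = '1' then
        if c6 = '6' ∨ c6 = '1' then "Elsevier" else "Crossref"
      else if c5 = '3' then
        if c6 = '8' then "Springer" else "Crossref"
      else "Crossref"
    else if c4 = '1' then
      if c5 = '1' ∧ c6 = '1' then "Wiley"
      else if c5 = '8' ∧ c6 = '6' then "Springer"
      else "Crossref"
    else "Crossref"
  | _ => "Crossref"

-- ===== PRECONDITION & SPEC =====
def Spec_classify_publisher (doi : String) (out : String) : Prop := out = classify_publisher_alt doi
instance (doi : String) (out : String) : Decidable (Spec_classify_publisher doi out) := by unfold Spec_classify_publisher; infer_instance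

-- ===== CLAIM (what is proved, stated in full; the proofs are below) =====
def Claim_equal_classify_publisher : Prop := ∀ (doi : String), Dom_classify_publisher doi → Spec_classify_publisher doi (classify_publisher doi)

-- ===== LEMMAS AND PROOFS =====

-- a 7-char prefix test is a test on the first 7 characters
theorem startswith_eq_take7 (l p : List Char) (hp : p.length = 7) :
    (p <+: l) ↔ (p = l.take 7) := by
  rw [List.prefix_iff_eq_take, hp]

-- A's three membership tests and B's decision tree agree on any list of characters
theorem tree_eq (t : List Char) :
    (if "10.1002".toList = t ∨ "10.1111".toList = t then "Wiley"
     else if "10.1016".toList = t ∨ "10.1011".toList = t then "Elsevier"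
     else if "10.1007".toList = t ∨ "10.1038".toList = t ∨ "10.1186".toList = t then "Springer"
     else "Crossref")
    = (match t with
       | [c0, c1, c2, c3, c4, c5, c6] =>
         if c0 ≠ '1' ∨ c1 ≠ '0' ∨ c2 ≠ '.' ∨ c3 ≠ '1' then "Crossref"
         else if c4 = '0' then
           if c5 = '0' then
             if c6 = '2' then "Wiley"
             else if c6 = '7' then "Springer"
             else "Crossref"
           else if c5 = '1' then
             if c6 = '6' ∨ c6 = '1' then "Elsevier" else "Crossref"
           else if c5 = '3' then
             if c6 = '8' then "Springer" else "Crossref"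
           else "Crossref"
         else if c4 = '1' then
           if c5 = '1' ∧ c6 = '1' then "Wiley"
           else if c5 = '8' ∧ c6 = '6' then "Springer"
           else "Crossref"
         else "Crossref"
       | _ => "Crossref") := by
  have h1 : "10.1002".toList = ['1','0','.','1','0','0','2'] := rfl
  have h2 : "10.1111".toList = ['1','0','.','1','1','1','1'] := rfl
  have h3 : "10.1016".toList = ['1','0','.','1','0','1','6'] := rfl
  have h4 : "10.1011".toList = ['1','0','.','1','0','1','1'] := rfl
  have h5 : "10.1007".toList = ['1','0','.','1','0','0','7'] := rfl
  have h6 : "10.1038".toList = ['1','0','.','1','0','3','8'] := rfl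
  have h7 : "10.1186".toList = ['1','0','.','1','1','8','6'] := rfl
  match t with
  | [] => simp [h1, h2, h3, h4, h5, h6, h7]
  | [_] => simp [h1, h2, h3, h4, h5, h6, h7]
  | [_, _] => simp [h1, h2, h3, h4, h5, h6, h7]
  | [_, _, _] => simp [h1, h2, h3, h4, h5, h6, h7]
  | [_, _, _, _] => simp [h1, h2, h3, h4, h5, h6, h7]
  | [_, _, _, _, _] => simp [h1, h2, h3, h4, h5, h6, h7]
  | [_, _, _, _, _, _] => simp [h1, h2, h3, h4, h5, h6, h7]
  | _ :: _ :: _ :: _ :: _ :: _ :: _ :: _ :: _ => simp [h1, h2, h3, h4, h5, h6, h7]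
  | [c0, c1, c2, c3, c4, c5, c6] =>
    simp only [h1, h2, h3, h4, h5, h6, h7, List.cons.injEq, and_true]
    split_ifs <;> simp_all [eq_comm] <;> tauto

theorem main_eq (doi : String) : classify_publisher doi = classify_publisher_alt doi := by
  unfold classify_publisher classify_publisher_alt WILEY_PREFIXES ELSEVIER_PREFIXES SPRINGER_PREFIXES
  have hkl : (PySem.Str.slice (PySem.Str.lower doi) none (some 7)).toList
      = (PySem.Str.lower doi).toList.take 7 := by
    simp [PySem.List.slice_to]
  have e1 := fun l => startswith_eq_take7 l ("10.1002".toList) (by decide)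
  have e2 := fun l => startswith_eq_take7 l ("10.1111".toList) (by decide)
  have e3 := fun l => startswith_eq_take7 l ("10.1016".toList) (by decide)
  have e4 := fun l => startswith_eq_take7 l ("10.1011".toList) (by decide)
  have e5 := fun l => startswith_eq_take7 l ("10.1007".toList) (by decide)
  have e6 := fun l => startswith_eq_take7 l ("10.1038".toList) (by decide)
  have e7 := fun l => startswith_eq_take7 l ("10.1186".toList) (by decide)
  simp only [List.any_cons, List.any_nil, Bool.or_false, Bool.or_eq_true,
    PySem.Str.startswith_eq, PySem.Chars.startswith_iff, e1, e2, e3, e4, e5, e6, e7, hkl]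
  exact tree_eq _

-- ===== VERDICT (by name: the statement is the Claim_ definition above) =====
theorem classify_publisher_spec : Claim_equal_classify_publisher := by
  intro doi _
  unfold Spec_classify_publisher
  exact main_eq doi
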